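-- pv_equiv track=rewrite | github.com/c-okelly/advent_of_code_2017 | python/day11.py | part1
-- ===== SOURCE A (Python) =====
-- def part1(puzzleInput):
--
--     moves = puzzleInput.split(",")
--
--     currPos = [0,0,0]
--     furthest = 0
--     for move in moves:
--         if move == "n":
--             currPos[0] = currPos[0] + 1
--             currPos[2] = currPos[2] - 1
--         elif move == "ne":
--             currPos[0] = currPos[0] + 1
--             currPos[1] = currPos[1] - 1
--         elif move == "nw":
--             currPos[1] = currPos[1] + 1
--             currPos[2] = currPos[2] - 1
--
--         elif move == "s":
--             currPos[0] = currPos[0] - 1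
--             currPos[2] = currPos[2] + 1
--         elif move == "se":
--             currPos[1] = currPos[1] - 1
--             currPos[2] = currPos[2] + 1
--         elif move == "sw":
--             currPos[0] = currPos[0] - 1
--             currPos[1] = currPos[1] + 1
--
--         distance = (abs(currPos[0]) + abs(currPos[1]) + abs(currPos[2])) // 2
--
--     return distance
-- ===== SOURCE B (Python) =====
-- def part1(puzzleInput):
--     # Character-level DFA over the raw string (no split): tokens are recognised
--     # by a transition table between commas; position kept in 2 axial coords;
--     # distance is the hex max-norm max(|q|,|r|,|q+r|).
--     TRANS = {("", "n"): "n", ("", "s"): "s",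
--              ("n", "e"): "ne", ("n", "w"): "nw",
--              ("s", "e"): "se", ("s", "w"): "sw"}
--     DELTA = {"n": (1, 0), "ne": (1, -1), "nw": (0, 1),
--              "s": (-1, 0), "se": (0, -1), "sw": (-1, 1)}
--     q = r = 0
--     state = ""
--     for ch in puzzleInput + ",":
--         if ch == ",":
--             dq, dr = DELTA.get(state, (0, 0))
--             q += dq
--             r += dr
--             state = ""
--         else:
--             state = TRANS.get((state, ch), "!")
--     return max(abs(q), abs(r), abs(q + r))
-- ===== Notes on version B (the rewrite author's own statement) =====
-- stated objective: alternative
-- what changed: B never splits the string: it runs a character-level DFA over the raw input (transition table, commit at each comma), keeps only two axial coordinates instead of three cube ones, and returns the hex max-norm max(|q|,|r|,|q+r|) instead of A's per-move cube walk with (|x|+|y|+|z|)//2 recomputed each step.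
import Mathlib
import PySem

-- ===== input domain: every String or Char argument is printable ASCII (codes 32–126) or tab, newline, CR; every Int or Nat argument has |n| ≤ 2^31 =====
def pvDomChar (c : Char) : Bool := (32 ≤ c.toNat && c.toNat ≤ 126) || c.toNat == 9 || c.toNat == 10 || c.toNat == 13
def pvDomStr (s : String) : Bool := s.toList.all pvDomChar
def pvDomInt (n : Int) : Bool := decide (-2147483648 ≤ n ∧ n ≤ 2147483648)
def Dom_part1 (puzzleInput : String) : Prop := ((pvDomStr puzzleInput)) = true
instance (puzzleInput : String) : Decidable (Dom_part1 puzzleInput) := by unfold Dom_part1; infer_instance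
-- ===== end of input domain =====

-- B replaces A's split-then-walk over three cube coordinates by a character-level
-- DFA over the raw string keeping two axial coordinates, finished with the hex
-- max-norm; equal return value is proved for every input (both programs total).

-- ===== PORT A =====
-- A keeps (currPos, distance) and recomputes the distance after every move.
def pvDist (p : Int × Int × Int) : Int :=
  PySem.Int.floordiv (|p.1| + |p.2.1| + |p.2.2|) 2

def pvStepA (st : (Int × Int × Int) × Int) (move : List Char) : (Int × Int × Int) × Int :=
  let x := st.1.1
  let y := st.1.2.1
  let z := st.1.2.2
  let p :=
    if move == ['n'] then (x + 1, y, z - 1)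
    else if move == ['n','e'] then (x + 1, y - 1, z)
    else if move == ['n','w'] then (x, y + 1, z - 1)
    else if move == ['s'] then (x - 1, y, z + 1)
    else if move == ['s','e'] then (x, y - 1, z + 1)
    else if move == ['s','w'] then (x - 1, y + 1, z)
    else (x, y, z)
  (p, pvDist p)

def part1 (puzzleInput : String) : Int :=
  ((PySem.Chars.splitOn puzzleInput.toList [',']).foldl pvStepA ((0, 0, 0), 0)).2

-- ===== PORT B =====
-- DFA states: "" | "n" | "s" | "ne" | "nw" | "se" | "sw" | "!" of Source B.
inductive St | s0 | stN | stS | stNE | stNW | stSE | stSW | dead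
deriving DecidableEq, Repr

-- the TRANS table of Source B (missing key -> "!")
def pvTrans : St → Char → St
  | .s0, c => if c = 'n' then .stN else if c = 's' then .stS else .dead
  | .stN, c => if c = 'e' then .stNE else if c = 'w' then .stNW else .dead
  | .stS, c => if c = 'e' then .stSE else if c = 'w' then .stSW else .dead
  | _, _ => .dead

-- the DELTA table of Source B (missing key -> (0,0))
def pvDQ : St → Int
  | .stN => 1 | .stNE => 1 | .stS => -1 | .stSW => -1 | _ => 0

def pvDR : St → Int
  | .stNW => 1 | .stSW => 1 | .stNE => -1 | .stSE => -1 | _ => 0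

def pvStepB (acc : (Int × Int) × St) (ch : Char) : (Int × Int) × St :=
  if ch = ',' then ((acc.1.1 + pvDQ acc.2, acc.1.2 + pvDR acc.2), .s0)
  else (acc.1, pvTrans acc.2 ch)

def pvFinal (p : Int × Int) : Int := max (max |p.1| |p.2|) |p.1 + p.2|

def part1_alt (puzzleInput : String) : Int :=
  pvFinal ((puzzleInput.toList ++ [',']).foldl pvStepB ((0, 0), .s0)).1

-- ===== PRECONDITION & SPEC =====
def Spec_part1 (puzzleInput : String) (out : Int) : Prop := out = part1_alt puzzleInput
instance (puzzleInput : String) (out : Int) : Decidable (Spec_part1 puzzleInput out) := by unfold Spec_part1; infer_instance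

-- ===== CLAIM (what is proved, stated in full; the proofs are below) =====
def Claim_equal_part1 : Prop := ∀ (puzzleInput : String), Dom_part1 puzzleInput → Spec_part1 puzzleInput (part1 puzzleInput)

-- ===== LEMMAS AND PROOFS =====

-- simple structural model of splitting on a single comma
def pvSplit : List Char → List (List Char)
  | [] => [[]]
  | c :: rest =>
      if c = ',' then [] :: pvSplit rest
      else (c :: (pvSplit rest).headI) :: (pvSplit rest).tail

lemma pvSplit_cons_eq (cs : List Char) :
    (pvSplit cs).headI :: (pvSplit cs).tail = pvSplit cs := by
  cases cs with
  | nil => simp [pvSplit]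
  | cons c rest => simp only [pvSplit]; split_ifs <;> simp

lemma pvSplitGo (fuel : Nat) :
    ∀ (l cur : List Char) (acc : List (List Char)), l.length ≤ fuel →
      PySem.Chars.splitOn.go [','] fuel l cur acc
        = acc.reverse ++ (cur.reverse ++ (pvSplit l).headI) :: (pvSplit l).tail := by
  induction fuel with
  | zero =>
      intro l cur acc h
      have : l = [] := by cases l <;> simp_all
      subst this
      simp [PySem.Chars.splitOn.go, pvSplit]
  | succ f ih =>
      intro l cur acc h
      cases l with
      | nil => simp [PySem.Chars.splitOn.go, pvSplit]
      | cons c rest =>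
          by_cases hc : c = ','
          · subst hc
            have hpre : List.isPrefixOf [','] (',' :: rest) = true := by
              simp [List.isPrefixOf]
            rw [PySem.Chars.splitOn.go]
            simp only [hpre, if_true, List.length_cons, List.length_nil, List.drop_succ_cons,
              List.drop_zero]
            rw [ih rest [] (cur.reverse :: acc) (by simpa using Nat.le_of_succ_le_succ h)]
            simp [pvSplit]
            exact pvSplit_cons_eq rest
          · have hpre : List.isPrefixOf [','] (c :: rest) = false := by
              simp [List.isPrefixOf]
              exact fun he => hc he.symm
            rw [PySem.Chars.splitOn.go]
            simp only [hpre, Bool.false_eq_true, if_false]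
            rw [ih rest (c :: cur) acc (by simpa using Nat.le_of_succ_le_succ h)]
            simp [pvSplit, hc]

lemma pvSplit_eq (cs : List Char) :
    PySem.Chars.splitOn cs [','] = pvSplit cs := by
  unfold PySem.Chars.splitOn
  rw [pvSplitGo cs.length.succ cs [] [] (Nat.le_succ _)]
  simpa using pvSplit_cons_eq cs

-- A-side characterisation: net cube position as direction counts
def pvPos (l : List (List Char)) (x y z : Int) : Int × Int × Int :=
  (x + l.count ['n'] + l.count ['n','e'] - l.count ['s'] - l.count ['s','w'],
   y + l.count ['n','w'] + l.count ['s','w'] - l.count ['n','e'] - l.count ['s','e'],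
   z + l.count ['s'] + l.count ['s','e'] - l.count ['n'] - l.count ['n','w'])

lemma pvFold (l : List (List Char)) :
    ∀ x y z : Int,
      l.foldl pvStepA ((x, y, z), pvDist (x, y, z)) = (pvPos l x y z, pvDist (pvPos l x y z)) := by
  induction l with
  | nil => intro x y z; simp [pvPos]
  | cons m rest ih =>
    intro x y z
    simp only [List.foldl_cons, pvStepA]
    have key : ∀ p : Int × Int × Int,
        List.foldl pvStepA (p, pvDist p) rest
          = (pvPos rest p.1 p.2.1 p.2.2, pvDist (pvPos rest p.1 p.2.1 p.2.2)) := by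
      rintro ⟨a, b, c⟩; exact ih a b c
    rw [key]
    split_ifs with h1 h2 h3 h4 h5 h6
    · rw [beq_iff_eq] at h1; subst h1
      have hp : pvPos rest (x + 1) y (z - 1) = pvPos (['n'] :: rest) x y z := by
        simp [pvPos, List.count_cons, Prod.ext_iff]; omega
      rw [show ((x + 1, y, z - 1) : Int × Int × Int).1 = x + 1 from rfl]
      rw [hp]
    · rw [beq_iff_eq] at h2; subst h2
      have hp : pvPos rest (x + 1) (y - 1) z = pvPos (['n','e'] :: rest) x y z := by
        simp [pvPos, List.count_cons, Prod.ext_iff]; omega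
      rw [hp]
    · rw [beq_iff_eq] at h3; subst h3
      have hp : pvPos rest x (y + 1) (z - 1) = pvPos (['n','w'] :: rest) x y z := by
        simp [pvPos, List.count_cons, Prod.ext_iff]; omega
      rw [hp]
    · rw [beq_iff_eq] at h4; subst h4
      have hp : pvPos rest (x - 1) y (z + 1) = pvPos (['s'] :: rest) x y z := by
        simp [pvPos, List.count_cons, Prod.ext_iff]; omega
      rw [hp]
    · rw [beq_iff_eq] at h5; subst h5
      have hp : pvPos rest x (y - 1) (z + 1) = pvPos (['s','e'] :: rest) x y z := by
        simp [pvPos, List.count_cons, Prod.ext_iff]; omega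
      rw [hp]
    · rw [beq_iff_eq] at h6; subst h6
      have hp : pvPos rest (x - 1) (y + 1) z = pvPos (['s','w'] :: rest) x y z := by
        simp [pvPos, List.count_cons, Prod.ext_iff]; omega
      rw [hp]
    · have hp : pvPos rest x y z = pvPos (m :: rest) x y z := by
        simp only [beq_iff_eq] at h1 h2 h3 h4 h5 h6
        simp [pvPos, List.count_cons, h1, h2, h3, h4, h5, h6]
      rw [hp]

-- B-side: token view of the DFA fold
def pvTokens : List (List Char) → St → Int × Int → Int × Int
  | [], _, acc => acc
  | t :: ts, st, acc =>
      pvTokens ts .s0 (acc.1 + pvDQ (t.foldl pvTrans st), acc.2 + pvDR (t.foldl pvTrans st))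

lemma pvFoldB (cs : List Char) :
    ∀ (st : St) (q r : Int),
      ((cs ++ [',']).foldl pvStepB ((q, r), st)).1 = pvTokens (pvSplit cs) st (q, r) := by
  induction cs with
  | nil => intro st q r; simp [pvStepB, pvSplit, pvTokens]
  | cons c rest ih =>
      intro st q r
      by_cases hc : c = ','
      · subst hc
        simp only [List.cons_append, List.foldl_cons, pvStepB, if_pos rfl]
        rw [ih]
        simp [pvSplit, pvTokens]
      · simp only [List.cons_append, List.foldl_cons, pvStepB, if_neg hc]
        rw [ih]
        rw [show pvSplit (c :: rest) = (c :: (pvSplit rest).headI) :: (pvSplit rest).tail from by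
          simp [pvSplit, hc]]
        conv_lhs => rw [← pvSplit_cons_eq rest]
        simp [pvTokens]

lemma pvRunDead (t : List Char) : t.foldl pvTrans .dead = .dead := by
  induction t with
  | nil => rfl
  | cons c rest ih => simpa [pvTrans] using ih

-- the per-token delta of the DFA started at state "" equals A's branch table
def pvTok (t : List Char) : Int × Int :=
  if t = ['n'] then (1, 0) else if t = ['n','e'] then (1, -1)
  else if t = ['n','w'] then (0, 1) else if t = ['s'] then (-1, 0)
  else if t = ['s','e'] then (0, -1) else if t = ['s','w'] then (-1, 1) else (0, 0)

lemma pvRunClass (t : List Char) :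
    (pvDQ (t.foldl pvTrans .s0), pvDR (t.foldl pvTrans .s0)) = pvTok t := by
  match t with
  | [] => decide
  | [a] =>
      by_cases h1 : a = 'n'
      · subst h1; decide
      · by_cases h2 : a = 's'
        · subst h2; decide
        · simp [pvTrans, pvTok, pvDQ, pvDR, h1, h2]
  | [a, b] =>
      by_cases h1 : a = 'n'
      · subst h1
        by_cases h2 : b = 'e'
        · subst h2; decide
        · by_cases h3 : b = 'w'
          · subst h3; decide
          · simp [pvTrans, pvTok, pvDQ, pvDR, h2, h3]
      · by_cases h2 : a = 's'
        · subst h2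
          by_cases h3 : b = 'e'
          · subst h3; decide
          · by_cases h4 : b = 'w'
            · subst h4; decide
            · simp [pvTrans, pvTok, pvDQ, pvDR, h3, h4]
        · simp [pvTrans, pvTok, pvDQ, pvDR, h1, h2]
  | a :: b :: c :: rest =>
      have hne : ∀ (s : St) (u : Char), pvTrans s u ≠ .s0 := by
        intro s u; cases s <;> simp [pvTrans] <;> split_ifs <;> simp
      have hdeep : ∀ (s : St), s ≠ .s0 → ∀ u : Char,
          pvTrans s u ≠ .stN ∧ pvTrans s u ≠ .stS := by
        intro s hs u; cases s <;> simp_all [pvTrans] <;> split_ifs <;> simp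
      have hfin : ∀ (s : St), s ≠ .s0 → s ≠ .stN → s ≠ .stS → ∀ u : Char,
          pvTrans s u = .dead := by
        intro s h1 h2 h3 u; cases s <;> simp_all [pvTrans]
      have hdead : pvTrans (pvTrans (pvTrans .s0 a) b) c = .dead := by
        have n1 := hne .s0 a
        have n2 := hdeep _ n1 b
        exact hfin _ (hne _ b) n2.1 n2.2 c
      simp only [List.foldl_cons, hdead, pvRunDead]
      simp [pvTok, pvDQ, pvDR]

lemma pvTokensCount (ts : List (List Char)) :
    ∀ q r : Int,
      pvTokens ts .s0 (q, r)
        = (q + ts.count ['n'] + ts.count ['n','e'] - ts.count ['s'] - ts.count ['s','w'],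
           r + ts.count ['n','w'] + ts.count ['s','w'] - ts.count ['n','e'] - ts.count ['s','e']) := by
  induction ts with
  | nil => intro q r; simp [pvTokens]
  | cons t rest ih =>
      intro q r
      simp only [pvTokens]
      rw [ih]
      have h := pvRunClass t
      have hq : pvDQ (t.foldl pvTrans .s0) = (pvTok t).1 := by rw [← h]
      have hr : pvDR (t.foldl pvTrans .s0) = (pvTok t).2 := by rw [← h]
      rw [hq, hr]
      unfold pvTok
      split_ifs <;> (subst_vars <;> simp [List.count_cons, Prod.ext_iff, *] <;> omega)

lemma pvMaxNorm (a b : Int) :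
    PySem.Int.floordiv (|a| + |b| + |-(a + b)|) 2 = max (max |a| |b|) |a + b| := by
  have habs : |-(a + b)| = |a + b| := abs_neg _
  have hsum : |a| + |b| + |a + b| = 2 * max (max |a| |b|) |a + b| := by
    rcases abs_cases a with ⟨h1, _⟩ | ⟨h1, _⟩ <;>
      rcases abs_cases b with ⟨h2, _⟩ | ⟨h2, _⟩ <;>
        rcases abs_cases (a + b) with ⟨h3, _⟩ | ⟨h3, _⟩ <;>
          rcases max_cases (max |a| |b|) |a + b| with ⟨h4, _⟩ | ⟨h4, _⟩ <;>
            rcases max_cases |a| |b| with ⟨h5, _⟩ | ⟨h5, _⟩ <;>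
              omega
  rw [habs, hsum]
  exact Int.mul_fdiv_cancel_left _ (by norm_num)

-- ===== VERDICT (by name: the statement is the Claim_ definition above) =====
theorem part1_spec : Claim_equal_part1 := by
  intro s _
  show part1 s = part1_alt s
  unfold part1 part1_alt
  rw [pvSplit_eq]
  rw [show ((((0:Int), (0:Int), (0:Int)), (0:Int)) : (Int × Int × Int) × Int)
        = ((0, 0, 0), pvDist (0, 0, 0)) from by decide]
  rw [pvFold]
  rw [pvFoldB]
  rw [pvTokensCount]
  simp only [pvPos, pvDist, pvFinal, zero_add]
  set cn : Nat := (pvSplit s.toList).count ['n']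
  set cne : Nat := (pvSplit s.toList).count ['n','e']
  set cnw : Nat := (pvSplit s.toList).count ['n','w']
  set cs' : Nat := (pvSplit s.toList).count ['s']
  set cse : Nat := (pvSplit s.toList).count ['s','e']
  set csw : Nat := (pvSplit s.toList).count ['s','w']
  rw [show (cs' : Int) + cse - cn - cnw
        = -(((cn : Int) + cne - cs' - csw) + ((cnw : Int) + csw - cne - cse)) from by ring]
  exact pvMaxNorm ((cn : Int) + cne - cs' - csw) ((cnw : Int) + csw - cne - cse)
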